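-- pv_equiv track=rewrite | github.com/KingaBunkowska/Zadania-WDI | Kolokwia/2019-2020-1a.py | f
-- ===== SOURCE A (Python) =====
-- import math
--
-- def suma_ele(t, i, n, N):
--     if i+n >= N:
--         return -math.inf
--     else:
--         result = 0
--         for x in range(i, n+i):
--             result += t[x]
--
--         return result
--
-- def f(t1, t2, N):
--     for size1 in range(1, 24):
--         size2 = 24-size1
--         for i1 in range(0,N-size1):
--             for i2 in range(0, N-size2):
--                 a = suma_ele(t1, i1, size1, N)
--                 b = suma_ele(t2, i2, size2, N)
--                 x = 2
--                 while x*x<=(a+b):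
--                     x += 1
--
--                 x -= 1
--                 if x*x==(a+b):
--                     return 1
--
--     return 0
-- ===== SOURCE B (Python) =====
-- import math
--
-- def f(t1, t2, N):
--     # No split size1 + size2 == 24 with both windows fitting exists when N < 13.
--     if N < 13:
--         return 0
--     p1 = [0]
--     for k in range(N - 1):
--         p1.append(p1[k] + t1[k])
--     p2 = [0]
--     for k in range(N - 1):
--         p2.append(p2[k] + t2[k])
--     for size1 in range(1, 24):
--         size2 = 24 - size1
--         for i1 in range(N - size1):
--             a = p1[i1 + size1] - p1[i1]
--             for i2 in range(N - size2):
--                 s = a + p2[i2 + size2] - p2[i2]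
--                 if s >= 1 and math.isqrt(s) ** 2 == s:
--                     return 1
--     return 0
-- ===== Notes on version B (the rewrite author's own statement) =====
-- stated objective: alternative
-- what changed: B precomputes prefix-sum arrays so each window sum is a difference of two prefixes instead of an O(24) re-summation, and tests perfect squares with math.isqrt instead of A's incremental x*x<=s search; the pair enumeration itself stays quadratic.
import Mathlib
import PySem

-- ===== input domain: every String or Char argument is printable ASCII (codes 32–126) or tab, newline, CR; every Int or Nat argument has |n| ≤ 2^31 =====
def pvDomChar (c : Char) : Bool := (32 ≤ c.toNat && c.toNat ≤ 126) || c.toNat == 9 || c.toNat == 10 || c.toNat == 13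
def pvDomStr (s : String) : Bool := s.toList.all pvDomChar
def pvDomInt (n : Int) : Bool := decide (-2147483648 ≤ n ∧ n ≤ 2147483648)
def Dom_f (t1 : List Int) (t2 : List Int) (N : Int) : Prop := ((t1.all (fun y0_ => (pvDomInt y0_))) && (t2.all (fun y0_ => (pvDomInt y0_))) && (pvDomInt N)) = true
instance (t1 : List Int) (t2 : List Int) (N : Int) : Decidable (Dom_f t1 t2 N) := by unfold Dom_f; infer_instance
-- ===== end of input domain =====

-- B computes each window sum as a difference of precomputed prefix sums and tests
-- perfect squares with an integer square root instead of A's per-pair re-summation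
-- and incremental square-root search.

-- ===== PORT A =====
-- suma_ele: `-math.inf` is ported as `none` (inside f, every comparison `x*x <= a+b` /
-- `x*x == a+b` involving -inf is False, which the `none` match arm below reproduces).
-- t[x] is ported with pyGetD 0: inputs where Python raises IndexError are excluded by Pre_f.
def sumaEle (t : List Int) (i : Int) (n : Int) (N : Int) : Option Int :=
  if i + n ≥ N then none
  else some ((PySem.List.pyRange i (n + i) 1).foldl (fun result x => result + PySem.List.pyGetD t x 0) 0)

-- termination measure for the `while x*x <= s: x += 1` loop (cited by sqLoop)
theorem sqLoop_measure {s x : Int} (h : x * x ≤ s) : (s + 1 - (x + 1)).toNat < (s + 1 - x).toNat := by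
  have hx : x ≤ x * x := by nlinarith [sq_nonneg x, sq_nonneg (x - 1)]
  omega

-- the while loop of A: returns the first x' ≥ x with x'*x' > s
def sqLoop (s : Int) (x : Int) : Int :=
  if h : x * x ≤ s then sqLoop s (x + 1) else x
termination_by (s + 1 - x).toNat
decreasing_by exact sqLoop_measure h

-- the inner-loop body of A: a, b, the while loop, x -= 1, the == test
def fInner (t1 t2 : List Int) (N size1 size2 i1 i2 : Int) : Bool :=
  match sumaEle t1 i1 size1 N, sumaEle t2 i2 size2 N with
  | some a, some b =>
      let x := sqLoop (a + b) 2 - 1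
      decide (x * x = a + b)
  | _, _ => false

-- the early `return 1` is ported as a Bool `||` fold (which iteration fires does not change the result)
def f (t1 : List Int) (t2 : List Int) (N : Int) : Int :=
  if (PySem.List.pyRange 1 24 1).foldl (fun found size1 =>
      let size2 := 24 - size1
      found || (PySem.List.pyRange 0 (N - size1) 1).foldl (fun found1 i1 =>
        found1 || (PySem.List.pyRange 0 (N - size2) 1).foldl (fun found2 i2 =>
          found2 || fInner t1 t2 N size1 size2 i1 i2) false) false) false
  then 1 else 0

-- ===== PORT B =====
-- p = [0]; for k in range(N-1): p.append(p[k] + t[k])   (p[k]/t[k] via pyGetD; IndexError inputs excluded by Pre_f)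
def prefixSums (t : List Int) (N : Int) : List Int :=
  (PySem.List.pyRange 0 (N - 1) 1).foldl
    (fun p k => p ++ [PySem.List.pyGetD p k 0 + PySem.List.pyGetD t k 0]) [0]

-- s >= 1 and math.isqrt(s) ** 2 == s   (math.isqrt ported as Nat.sqrt)
def sqCheckB (s : Int) : Bool := decide (1 ≤ s) && decide (((Nat.sqrt s.toNat : Int)) ^ 2 = s)

def f_alt (t1 : List Int) (t2 : List Int) (N : Int) : Int :=
  if N < 13 then 0
  else
    let p1 := prefixSums t1 N
    let p2 := prefixSums t2 N
    if (PySem.List.pyRange 1 24 1).foldl (fun found size1 =>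
        let size2 := 24 - size1
        found || (PySem.List.pyRange 0 (N - size1) 1).foldl (fun found1 i1 =>
          let a := PySem.List.pyGetD p1 (i1 + size1) 0 - PySem.List.pyGetD p1 i1 0
          found1 || (PySem.List.pyRange 0 (N - size2) 1).foldl (fun found2 i2 =>
            found2 || sqCheckB (a + PySem.List.pyGetD p2 (i2 + size2) 0 - PySem.List.pyGetD p2 i2 0)) false) false) false
    then 1 else 0

-- ===== PRECONDITION & SPEC =====
-- Pre_f excludes inputs where A's indexing t[x] can raise IndexError: N ≥ 13 with a list
-- shorter than N-1 (on a few such inputs A happens to return 1 before reaching the bad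
-- index; B builds its prefix sums up front and raises IndexError there).
def Pre_f (t1 : List Int) (t2 : List Int) (N : Int) : Prop :=
  N < 13 ∨ (N - 1 ≤ (t1.length : Int) ∧ N - 1 ≤ (t2.length : Int))
instance (t1 : List Int) (t2 : List Int) (N : Int) : Decidable (Pre_f t1 t2 N) := by unfold Pre_f; infer_instance

def pvWitness_f : List Int × List Int × Int :=
  ([0, 0, 0, 0, 0, 0, 0, 0, 0, 0, 0, 0], [1, 0, 0, 0, 0, 0, 0, 0, 0, 0, 0, 0], 13)

def Spec_f (t1 : List Int) (t2 : List Int) (N : Int) (out : Int) : Prop := out = f_alt t1 t2 N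
instance (t1 : List Int) (t2 : List Int) (N : Int) (out : Int) : Decidable (Spec_f t1 t2 N out) := by unfold Spec_f; infer_instance

-- ===== CLAIM (what is proved, stated in full; the proofs are below) =====
def Claim_equal_f : Prop := ∀ (t1 : List Int) (t2 : List Int) (N : Int), Dom_f t1 t2 N → Pre_f t1 t2 N → Spec_f t1 t2 N (f t1 t2 N)

-- ===== LEMMAS AND PROOFS =====

theorem sqLoop_gt (s x : Int) : s < sqLoop s x * sqLoop s x := by
  induction x using sqLoop.induct s with
  | case1 x h ih => rw [sqLoop, dif_pos h]; exact ih
  | case2 x h => rw [sqLoop, dif_neg h]; omega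

theorem sqLoop_ge (s x : Int) : x ≤ sqLoop s x := by
  induction x using sqLoop.induct s with
  | case1 x h ih => rw [sqLoop, dif_pos h]; omega
  | case2 x h => rw [sqLoop, dif_neg h]

theorem sqLoop_prev (s x : Int) (h : (x - 1) * (x - 1) ≤ s) :
    (sqLoop s x - 1) * (sqLoop s x - 1) ≤ s := by
  induction x using sqLoop.induct s with
  | case1 x h' ih => rw [sqLoop, dif_pos h']; exact ih (by simpa using h')
  | case2 x h' => rw [sqLoop, dif_neg h']; exact h

theorem sq_check_eq (s : Int) :
    decide ((sqLoop s 2 - 1) * (sqLoop s 2 - 1) = s) = sqCheckB s := by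
  by_cases hs : 1 ≤ s
  · have h1 : (sqLoop s 2 - 1) * (sqLoop s 2 - 1) ≤ s := sqLoop_prev s 2 (by simpa using hs)
    have h2 : s < sqLoop s 2 * sqLoop s 2 := sqLoop_gt s 2
    have h3 : 2 ≤ sqLoop s 2 := sqLoop_ge s 2
    set r := sqLoop s 2 with hr
    have hm : ((r - 1).toNat : Int) = r - 1 := Int.toNat_of_nonneg (by omega)
    have hsc : (s.toNat : Int) = s := Int.toNat_of_nonneg (by omega)
    have hsq : Nat.sqrt s.toNat = (r - 1).toNat := by
      apply le_antisymm
      · have hlt : s.toNat < ((r - 1).toNat + 1) * ((r - 1).toNat + 1) := by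
          have hc : ((((r - 1).toNat + 1) * ((r - 1).toNat + 1) : Nat) : Int) = r * r := by
            push_cast [hm]; ring
          exact_mod_cast (by rw [hsc, hc]; exact h2 :
            (s.toNat : Int) < ((((r - 1).toNat + 1) * ((r - 1).toNat + 1) : Nat) : Int))
        have := Nat.sqrt_lt.mpr hlt
        omega
      · apply Nat.le_sqrt.mpr
        have hc : (((r - 1).toNat * (r - 1).toNat : Nat) : Int) = (r - 1) * (r - 1) := by
          push_cast [hm]; ring
        exact_mod_cast (by rw [hsc, hc]; exact h1 :
          (((r - 1).toNat * (r - 1).toNat : Nat) : Int) ≤ (s.toNat : Int))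
    simp only [sqCheckB, hsq, hm, pow_two]
    simp [hs]
  · have h2 : sqLoop s 2 = 2 := by rw [sqLoop, dif_neg (by omega)]
    rw [h2]
    simp only [sqCheckB]
    simp [hs]
    omega

theorem prefix_fold (t : List Int) (m : Nat) (hlen : m ≤ t.length) :
    (PySem.List.pyRange 0 (m : Int) 1).foldl
      (fun p k => p ++ [PySem.List.pyGetD p k 0 + PySem.List.pyGetD t k 0]) [0]
    = (List.range (m + 1)).map (fun j => (t.take j).sum) := by
  induction m with
  | zero => simp [PySem.List.pyRange_one_eq_nil]
  | succ m ih =>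
      have hm : m ≤ t.length := by omega
      rw [show ((m + 1 : Nat) : Int) = (m : Int) + 1 by push_cast; ring,
          PySem.List.pyRange_one_succ_right (by positivity), List.foldl_append, ih hm]
      have hlenmap : ((List.range (m + 1)).map (fun j => (t.take j).sum)).length = m + 1 := by simp
      have hget : PySem.List.pyGetD ((List.range (m + 1)).map (fun j => (t.take j).sum)) (m : Int) 0
          = (t.take m).sum := by
        rw [PySem.List.pyGetD_natCast]
        simp [List.getD_eq_getElem?_getD]
      have htget : PySem.List.pyGetD t (m : Int) 0 = t[m] := by
        rw [PySem.List.pyGetD_natCast]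
        simp [List.getD_eq_getElem?_getD, List.getElem?_eq_getElem (by omega : m < t.length)]
        rfl
      have hstep : (t.take (m + 1)).sum = (t.take m).sum + t[m] := by
        rw [List.take_add_one, List.sum_append,
            List.getElem?_eq_getElem (by omega : m < t.length)]
        simp
        rfl
      simp only [List.foldl_cons, List.foldl_nil, hget, htget]
      rw [List.range_succ (n := m + 1), List.map_append]
      simp [hstep]

theorem prefixSums_getD (t : List Int) (N : Int) (hN : 1 ≤ N)
    (hlen : N - 1 ≤ (t.length : Int)) (j : Int) (h0 : 0 ≤ j) (hj : j ≤ N - 1) :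
    PySem.List.pyGetD (prefixSums t N) j 0 = (t.take j.toNat).sum := by
  have hm : N - 1 = ((N - 1).toNat : Int) := by omega
  rw [prefixSums, hm, prefix_fold t (N - 1).toNat (by omega),
      show j = (j.toNat : Int) by omega, PySem.List.pyGetD_natCast,
      PySem.List.getD_map_range _ _ _ _ (by omega)]
  rw [Int.toNat_natCast]

theorem sum_range_getD (t : List Int) (a n : Nat) (hlen : a + n ≤ t.length) :
    ((List.range n).map (fun k => t.getD (a + k) 0)).sum
      = (t.take (a + n)).sum - (t.take a).sum := by
  induction n with
  | zero => simp
  | succ n ih =>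
      rw [List.range_succ, List.map_append, List.sum_append, ih (by omega)]
      have : (t.take (a + n + 1)).sum = (t.take (a + n)).sum + t[a + n] := by
        rw [List.take_add_one, List.sum_append,
            List.getElem?_eq_getElem (by omega : a + n < t.length)]
        simp
        rfl
      simp [List.getD_eq_getElem?_getD, List.getElem?_eq_getElem (by omega : a + n < t.length),
        show a + (n + 1) = a + n + 1 by omega, this]
      omega

theorem window_sum_eq (t : List Int) (i n : Int) (h0 : 0 ≤ i) (hn : 0 ≤ n)
    (hlen : i + n ≤ (t.length : Int)) :
    (PySem.List.pyRange i (n + i) 1).foldl (fun result x => result + PySem.List.pyGetD t x 0) 0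
      = (t.take (i + n).toNat).sum - (t.take i.toNat).sum := by
  rw [PySem.List.pyRange_one, List.foldl_map,
      PySem.List.foldl_add _ (fun k : Nat => PySem.List.pyGetD t (i + (k : Int)) 0) 0]
  have hnn : (n + i - i).toNat = n.toNat := by omega
  have hcast : ∀ k : Nat, PySem.List.pyGetD t (i + (k : Int)) 0 = t.getD (i.toNat + k) 0 := by
    intro k
    rw [show i + (k : Int) = ((i.toNat + k : Nat) : Int) by omega, PySem.List.pyGetD_natCast]
  simp only [hnn, hcast]
  rw [sum_range_getD t i.toNat n.toNat (by omega)]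
  have : i.toNat + n.toNat = (i + n).toNat := by omega
  rw [this]
  ring

theorem foldl_or_false {alpha : Type} (l : List alpha) (p : alpha → Bool)
    (h : ∀ x ∈ l, p x = false) : l.foldl (fun acc x => acc || p x) false = false := by
  induction l with
  | nil => rfl
  | cons x xs ih =>
      simp only [List.foldl_cons, h x (by simp), Bool.or_false]
      exact ih (fun y hy => h y (by simp [hy]))

-- ===== VERDICT (by name: the statement is the Claim_ definition above) =====
theorem f_spec : Claim_equal_f := by
  intro t1 t2 N _hdom hpre
  unfold Spec_f
  by_cases hN : N < 13
  · -- both sides return 0: every (size1, size2) split has an empty index range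
    have hA : f t1 t2 N = 0 := by
      unfold f
      rw [if_neg]
      rw [Bool.not_eq_true]
      apply foldl_or_false
      intro size1 hs1
      rw [PySem.List.mem_pyRange_one] at hs1
      by_cases h1 : N - size1 ≤ 0
      · rw [PySem.List.pyRange_one_eq_nil h1]; rfl
      · apply foldl_or_false
        intro i1 _
        rw [PySem.List.pyRange_one_eq_nil (by omega)]
        rfl
    rw [hA]
    unfold f_alt
    rw [if_pos hN]
  · obtain hlen | hlen := hpre
    · omega
    obtain ⟨hl1, hl2⟩ := hlen
    simp only [f, f_alt, if_neg hN]
    have hc :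
        (PySem.List.pyRange 1 24 1).foldl (fun found size1 =>
          found || (PySem.List.pyRange 0 (N - size1) 1).foldl (fun found1 i1 =>
            found1 || (PySem.List.pyRange 0 (N - (24 - size1)) 1).foldl (fun found2 i2 =>
              found2 || fInner t1 t2 N size1 (24 - size1) i1 i2) false) false) false
      = (PySem.List.pyRange 1 24 1).foldl (fun found size1 =>
          found || (PySem.List.pyRange 0 (N - size1) 1).foldl (fun found1 i1 =>
            found1 || (PySem.List.pyRange 0 (N - (24 - size1)) 1).foldl (fun found2 i2 =>
              found2 || sqCheckB (PySem.List.pyGetD (prefixSums t1 N) (i1 + size1) 0 -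
                  PySem.List.pyGetD (prefixSums t1 N) i1 0 +
                  PySem.List.pyGetD (prefixSums t2 N) (i2 + (24 - size1)) 0 -
                  PySem.List.pyGetD (prefixSums t2 N) i2 0)) false) false) false := by
      apply PySem.List.foldl_congr_mem
      intro acc size1 hs1
      rw [PySem.List.mem_pyRange_one] at hs1
      congr 1
      apply PySem.List.foldl_congr_mem
      intro acc1 i1 hi1
      rw [PySem.List.mem_pyRange_one] at hi1
      congr 1
      apply PySem.List.foldl_congr_mem
      intro acc2 i2 hi2
      rw [PySem.List.mem_pyRange_one] at hi2
      congr 1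
      -- core: A's per-pair computation equals B's prefix-sum computation
      have hsa : sumaEle t1 i1 size1 N
          = some ((t1.take (i1 + size1).toNat).sum - (t1.take i1.toNat).sum) := by
        rw [sumaEle, if_neg (by omega)]
        rw [window_sum_eq t1 i1 size1 (by omega) (by omega) (by omega)]
      have hsb : sumaEle t2 i2 (24 - size1) N
          = some ((t2.take (i2 + (24 - size1)).toNat).sum - (t2.take i2.toNat).sum) := by
        rw [sumaEle, if_neg (by omega)]
        rw [window_sum_eq t2 i2 (24 - size1) (by omega) (by omega) (by omega)]
      rw [prefixSums_getD t1 N (by omega) (by omega) (i1 + size1) (by omega) (by omega),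
          prefixSums_getD t1 N (by omega) (by omega) i1 (by omega) (by omega),
          prefixSums_getD t2 N (by omega) (by omega) (i2 + (24 - size1)) (by omega) (by omega),
          prefixSums_getD t2 N (by omega) (by omega) i2 (by omega) (by omega)]
      simp only [fInner, hsa, hsb]
      rw [sq_check_eq]
      congr 1
      ring
    rw [hc]
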